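-- pv_equiv track=rewrite | github.com/SriganthVaratharaj/Final-Sem-Proj-Updated | backend/ocr/engine.py | _count_script_chars
-- ===== SOURCE A (Python) =====
-- def _count_script_chars(texts, ranges):
--     count = 0
--     for text in texts:
--         for ch in text:
--             code = ord(ch)
--             for start, end in ranges:
--                 if start <= code <= end:
--                     count += 1
--                     break
--     return count
-- ===== SOURCE B (Python) =====
-- def _count_script_chars(texts, ranges):
--     # Tally each codepoint once, then test ranges per DISTINCT codepoint only.
--     freq = {}
--     for text in texts:
--         for ch in text:
--             code = ord(ch)
--             freq[code] = freq.get(code, 0) + 1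
--     total = 0
--     for code, n in freq.items():
--         if any(start <= code <= end for start, end in ranges):
--             total += n
--     return total
-- ===== Notes on version B (the rewrite author's own statement) =====
-- stated objective: alternative
-- what changed: Instead of scanning the range list (with early break) for every character occurrence, B builds a frequency dict of codepoints in one pass and tests the ranges only once per distinct codepoint, adding that codepoint's count.
import Mathlib
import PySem

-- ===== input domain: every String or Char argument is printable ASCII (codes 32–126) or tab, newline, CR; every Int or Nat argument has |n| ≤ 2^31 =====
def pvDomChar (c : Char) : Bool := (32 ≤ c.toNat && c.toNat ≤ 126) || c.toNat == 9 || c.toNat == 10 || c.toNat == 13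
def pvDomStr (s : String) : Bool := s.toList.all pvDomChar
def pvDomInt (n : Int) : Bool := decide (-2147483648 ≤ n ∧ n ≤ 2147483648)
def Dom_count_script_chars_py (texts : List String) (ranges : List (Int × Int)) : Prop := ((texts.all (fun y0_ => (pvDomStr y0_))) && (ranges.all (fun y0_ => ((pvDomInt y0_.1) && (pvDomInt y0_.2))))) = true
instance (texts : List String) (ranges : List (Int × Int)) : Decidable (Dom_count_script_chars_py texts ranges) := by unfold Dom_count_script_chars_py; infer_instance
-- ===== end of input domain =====

-- B replaces A's per-character scan over `ranges` (with early break) by a frequency dict built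
-- in one pass, testing the ranges only once per DISTINCT codepoint (objective: alternative).

-- ===== PORT A =====
-- inner 'for start, end in ranges: if start <= code <= end: count += 1; break'
def pvLoopRanges (code : Int) (ranges : List (Int × Int)) (count : Int) : Int :=
  match ranges with
  | [] => count
  | (s, e) :: rest => if s ≤ code ∧ code ≤ e then count + 1 else pvLoopRanges code rest count

def count_script_chars_py (texts : List String) (ranges : List (Int × Int)) : Int :=
  texts.foldl
    (fun count text =>
      text.toList.foldl (fun count ch => pvLoopRanges ((ch.toNat : Int)) ranges count) count)
    0

-- ===== PORT B =====
-- 'freq[code] = freq.get(code, 0) + 1' over all texts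
def pvFreq (texts : List String) : PySem.Dict Int Int :=
  texts.foldl
    (fun d text =>
      text.toList.foldl
        (fun d ch => d.insert ((ch.toNat : Int)) (d.getD ((ch.toNat : Int)) 0 + 1)) d)
    PySem.Dict.empty

def count_script_chars_py_alt (texts : List String) (ranges : List (Int × Int)) : Int :=
  (pvFreq texts).items.foldl
    (fun total kn =>
      if ranges.any (fun r => decide (r.1 ≤ kn.1 ∧ kn.1 ≤ r.2)) then total + kn.2 else total)
    0

-- ===== PRECONDITION & SPEC =====
def Spec_count_script_chars_py (texts : List String) (ranges : List (Int × Int)) (out : Int) : Prop := out = count_script_chars_py_alt texts ranges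
instance (texts : List String) (ranges : List (Int × Int)) (out : Int) : Decidable (Spec_count_script_chars_py texts ranges out) := by unfold Spec_count_script_chars_py; infer_instance

-- ===== CLAIM (what is proved, stated in full; the proofs are below) =====
def Claim_equal_count_script_chars_py : Prop := ∀ (texts : List String) (ranges : List (Int × Int)), Dom_count_script_chars_py texts ranges → Spec_count_script_chars_py texts ranges (count_script_chars_py texts ranges)

-- ===== LEMMAS AND PROOFS =====

-- all codepoints of all texts, in order
def pvCodes (texts : List String) : List Int :=
  texts.flatMap (fun t => t.toList.map (fun ch => ((ch.toNat : Int))))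

-- the membership predicate both programs test
def pvHit (ranges : List (Int × Int)) (code : Int) : Bool :=
  ranges.any (fun r => decide (r.1 ≤ code ∧ code ≤ r.2))

theorem pvLoopRanges_eq (code : Int) (ranges : List (Int × Int)) (c : Int) :
    pvLoopRanges code ranges c = c + (if pvHit ranges code then 1 else 0) := by
  induction ranges with
  | nil => simp [pvLoopRanges, pvHit]
  | cons r rest ih =>
    obtain ⟨s, e⟩ := r
    show (if s ≤ code ∧ code ≤ e then c + 1 else pvLoopRanges code rest c) = _
    by_cases h : s ≤ code ∧ code ≤ e
    · simp [pvHit, h]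
    · rw [if_neg h, ih]
      have hd : decide (s ≤ code ∧ code ≤ e) = false := by simp [h]
      simp only [pvHit, List.any_cons, hd, Bool.false_or]
      rfl

theorem pvA_eq (texts : List String) (ranges : List (Int × Int)) :
    count_script_chars_py texts ranges
      = ((pvCodes texts).map (fun k => if pvHit ranges k then (1 : Int) else 0)).sum := by
  unfold count_script_chars_py pvCodes
  have h0 : texts.foldl
      (fun count text =>
        text.toList.foldl (fun count ch => pvLoopRanges ((ch.toNat : Int)) ranges count) count) 0
      = (texts.flatMap (fun t => t.toList.map (fun ch => ((ch.toNat : Int))))).foldl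
          (fun c k => pvLoopRanges k ranges c) 0 := by
    rw [List.foldl_flatMap]
    simp only [List.foldl_map]
  rw [h0, PySem.List.foldl_congr_mem _ _ (fun c k => c + (if pvHit ranges k then (1 : Int) else 0))
        0 (fun acc x _ => pvLoopRanges_eq x ranges acc),
      PySem.List.foldl_add]
  simp

theorem pvB_eq (texts : List String) (ranges : List (Int × Int)) :
    count_script_chars_py_alt texts ranges
      = ((PySem.Set.ofList (pvCodes texts)).map
          (fun k => if pvHit ranges k then ((pvCodes texts).count k : Int) else 0)).sum := by
  unfold count_script_chars_py_alt
  have hfreq : pvFreq texts = PySem.Dict.counter (pvCodes texts) := by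
    unfold pvFreq
    rw [← PySem.Dict.foldl_insert_getD_add_one_eq_counter, pvCodes, List.foldl_flatMap]
    congr 1; funext d t; rw [List.foldl_map]
  rw [hfreq, PySem.Dict.items_counter]
  rw [PySem.List.foldl_congr_mem _ _
        (fun total kn => total + (if pvHit ranges kn.1 then kn.2 else 0)) 0
        (fun acc kn _ => by
          show (if (ranges.any fun r => decide (r.1 ≤ kn.1 ∧ kn.1 ≤ r.2)) = true
                then acc + kn.2 else acc) = acc + (if pvHit ranges kn.1 then kn.2 else 0)
          by_cases h : pvHit ranges kn.1
          · rw [if_pos (by simpa [pvHit] using h), if_pos h]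
          · rw [if_neg (by simpa [pvHit] using h), if_neg h, add_zero]),
      PySem.List.foldl_add]
  simp [List.map_map, Function.comp_def]

theorem pvSum_distinct_eq (codes : List Int) (p : Int → Bool) :
    ((PySem.Set.ofList codes).map (fun k => if p k then (codes.count k : Int) else 0)).sum
      = (codes.map (fun k => if p k then (1 : Int) else 0)).sum := by
  have hnd : (PySem.Set.ofList codes).Nodup := PySem.Set.nodup_ofList codes
  have hfs : (PySem.Set.ofList codes).toFinset = codes.toFinset := by
    ext x; simp [PySem.Set.mem_ofList]
  rw [← List.sum_toFinset _ hnd, hfs, PySem.List.sum_map_ite_one_zero]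
  have hcount : ∀ k : Int, (if p k then (codes.count k : Int) else 0)
      = ((codes.filter p).count k : Int) := by
    intro k
    by_cases h : p k = true
    · simp [h, List.count_filter h]
    · have hnm : k ∉ codes.filter p := by
        intro hm
        rw [List.mem_filter] at hm
        simp [hm.2] at h
      simp [h, List.count_eq_zero.mpr hnm]
  simp only [hcount]
  rw [← Nat.cast_sum]
  have hsub : (codes.filter p).toFinset ⊆ codes.toFinset := by
    intro x hx
    rw [List.mem_toFinset, List.mem_filter] at hx
    rw [List.mem_toFinset]
    exact hx.1
  have : ∑ k ∈ codes.toFinset, (codes.filter p).count k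
      = ∑ k ∈ (codes.filter p).toFinset, (codes.filter p).count k := by
    symm
    apply Finset.sum_subset hsub
    intro x _ hx
    rw [List.mem_toFinset] at hx
    exact List.count_eq_zero.mpr hx
  rw [this, List.sum_toFinset_count_eq_length, List.countP_eq_length_filter]

-- ===== VERDICT (by name: the statement is the Claim_ definition above) =====
theorem count_script_chars_py_spec : Claim_equal_count_script_chars_py := by
  intro texts ranges _
  unfold Spec_count_script_chars_py
  rw [pvA_eq, pvB_eq, pvSum_distinct_eq]
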